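-- pv_equiv track=rewrite | github.com/Waelalzoub1/Propaired | Server/main.py | _looks_like_spaced_phone
-- ===== SOURCE A (Python) =====
-- PHONE_SEPARATORS = set(" -().")
--
-- def _looks_like_spaced_phone(content: str) -> bool:
--     digits = 0
--     separators = 0
--     for ch in content:
--         if ch.isdigit():
--             digits += 1
--             continue
--         if ch in PHONE_SEPARATORS and digits:
--             separators += 1
--             continue
--         if digits >= 10 and separators >= 1:
--             return True
--         digits = 0
--         separators = 0
--     return digits >= 10 and separators >= 1
-- ===== SOURCE B (Python) =====
-- PHONE_SEPARATORS = set(" -().")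
--
-- def _looks_like_spaced_phone(content: str) -> bool:
--     # Tokenizer: find each run starting at a digit, consume it wholesale, test its counts.
--     n = len(content)
--     i = 0
--     while i < n:
--         if not content[i].isdigit():
--             i += 1
--             continue
--         # token starts at a digit; consume the maximal digit/separator run
--         digits = 1
--         seps = 0
--         j = i + 1
--         while j < n and (content[j].isdigit() or content[j] in PHONE_SEPARATORS):
--             if content[j].isdigit():
--                 digits += 1
--             else:
--                 seps += 1
--             j += 1
--         if digits >= 10 and seps >= 1:
--             return True
--         i = j
--     return False
-- ===== Notes on version B (the rewrite author's own statement) =====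
-- stated objective: alternative
-- what changed: Replaced the per-character state machine with resets by a two-level tokenizer: skip to the next digit, consume the whole digit/separator run in an inner loop, and test that run's digit and separator counts.
import Mathlib
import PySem

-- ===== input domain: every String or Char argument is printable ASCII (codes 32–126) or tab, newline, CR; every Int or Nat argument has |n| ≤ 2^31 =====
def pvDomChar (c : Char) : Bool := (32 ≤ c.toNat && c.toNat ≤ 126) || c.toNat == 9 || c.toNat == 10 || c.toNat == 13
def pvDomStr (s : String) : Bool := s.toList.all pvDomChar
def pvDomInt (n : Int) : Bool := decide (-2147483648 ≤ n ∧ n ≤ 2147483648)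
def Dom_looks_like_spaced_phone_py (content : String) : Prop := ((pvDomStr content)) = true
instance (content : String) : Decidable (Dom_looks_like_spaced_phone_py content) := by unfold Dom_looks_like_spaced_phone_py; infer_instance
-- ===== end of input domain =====

-- B replaces A's reset-on-break state machine by a two-level tokenizer (skip to a digit,
-- consume the whole digit/separator run, test its counts); same cost, alternative structure.

-- ===== PORT A =====
-- PHONE_SEPARATORS = set(" -().")
def phoneSep (c : Char) : Bool := c = ' ' || c = '-' || c = '(' || c = ')' || c = '.'

-- the for-loop of A, state = (digits, separators); early `return True` ends the recursion
def aLoop : List Char → Nat → Nat → Bool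
  | [], digits, seps => decide (10 ≤ digits) && decide (1 ≤ seps)
  | ch :: rest, digits, seps =>
    if PySem.Chars.isdigit ch then aLoop rest (digits + 1) seps
    else if phoneSep ch && decide (digits ≠ 0) then aLoop rest digits (seps + 1)
    else if decide (10 ≤ digits) && decide (1 ≤ seps) then true
    else aLoop rest 0 0

def looks_like_spaced_phone_py (content : String) : Bool :=
  aLoop content.toList 0 0

-- ===== PORT B =====
-- Source B's inner while loop: consume the maximal digit/separator run,
-- threading (digits, seps); returns the counts and the unconsumed rest
def runCount : List Char → Nat → Nat → Nat × Nat × List Char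
  | [], digits, seps => (digits, seps, [])
  | c :: rest, digits, seps =>
    if PySem.Chars.isdigit c then runCount rest (digits + 1) seps
    else if phoneSep c then runCount rest digits (seps + 1)
    else (digits, seps, c :: rest)

lemma runCount_len : ∀ (l : List Char) (d s : Nat), (runCount l d s).2.2.length ≤ l.length := by
  intro l
  induction l with
  | nil => intro d s; simp [runCount]
  | cons c rest ih =>
    intro d s
    simp only [runCount]
    split
    · exact le_trans (ih _ _) (Nat.le_succ _)
    · split
      · exact le_trans (ih _ _) (Nat.le_succ _)
      · simp

-- Source B's outer while loop: skip to the next digit, then hand the run to runCount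
def bScan : List Char → Bool
  | [] => false
  | c :: rest =>
    if PySem.Chars.isdigit c then
      let t := runCount rest 1 0
      if decide (10 ≤ t.1) && decide (1 ≤ t.2.1) then true
      else bScan t.2.2
    else bScan rest
termination_by l => l.length
decreasing_by
  · exact Nat.lt_succ_of_le (runCount_len rest 1 0)
  · simp

def looks_like_spaced_phone_py_alt (content : String) : Bool :=
  bScan content.toList

-- ===== PRECONDITION & SPEC =====
def Spec_looks_like_spaced_phone_py (content : String) (out : Bool) : Prop := out = looks_like_spaced_phone_py_alt content
instance (content : String) (out : Bool) : Decidable (Spec_looks_like_spaced_phone_py content out) := by unfold Spec_looks_like_spaced_phone_py; infer_instance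

-- ===== CLAIM (what is proved, stated in full; the proofs are below) =====
def Claim_equal_looks_like_spaced_phone_py : Prop := ∀ (content : String), Dom_looks_like_spaced_phone_py content → Spec_looks_like_spaced_phone_py content (looks_like_spaced_phone_py content)

-- ===== LEMMAS AND PROOFS =====

-- Joint invariant, by strong induction on the length:
-- (main) from the reset state A's loop is B's scan; (run) inside a run (digits ≥ 1)
-- A's loop equals: finish the run with runCount, test, then continue scanning.
lemma key : ∀ (n : Nat) (l : List Char), l.length ≤ n →
    (aLoop l 0 0 = bScan l) ∧
    (∀ d s : Nat, 1 ≤ d →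
      aLoop l d s =
        (if decide (10 ≤ (runCount l d s).1) && decide (1 ≤ (runCount l d s).2.1) then true
         else bScan (runCount l d s).2.2)) := by
  intro n
  induction n with
  | zero =>
    intro l hl
    have : l = [] := List.eq_nil_of_length_eq_zero (Nat.le_zero.mp hl)
    subst this
    constructor
    · simp [aLoop, bScan]
    · intro d s _
      simp only [aLoop, runCount]
      cases h : decide (10 ≤ d) && decide (1 ≤ s) <;> simp [bScan, h]
  | succ n ih =>
    intro l hl
    cases l with
    | nil =>
      constructor
      · simp [aLoop, bScan]
      · intro d s _
        simp only [aLoop, runCount]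
        cases h : decide (10 ≤ d) && decide (1 ≤ s) <;> simp [bScan, h]
    | cons c rest =>
      have hrest : rest.length ≤ n := Nat.le_of_succ_le_succ hl
      constructor
      · -- main: aLoop (c::rest) 0 0 = bScan (c::rest)
        cases hdig : PySem.Chars.isdigit c with
        | true =>
          simp only [aLoop, bScan, hdig, if_true]
          exact (ih rest hrest).2 1 0 (le_refl 1)
        | false =>
          have h2 : (phoneSep c && decide ((0:Nat) ≠ 0)) = false := by simp
          simp only [aLoop, bScan, hdig, h2, Bool.false_eq_true, if_false]
          simpa using (ih rest hrest).1
      · -- run: digits ≥ 1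
        intro d s hd
        cases hdig : PySem.Chars.isdigit c with
        | true =>
          simp only [aLoop, runCount, hdig, if_true]
          exact (ih rest hrest).2 (d + 1) s (Nat.le_succ_of_le hd)
        | false =>
          cases hsep : phoneSep c with
          | true =>
            have hdne : (true && decide (d ≠ 0)) = true := by simp; omega
            simp only [aLoop, runCount, hdig, hsep, Bool.false_eq_true, if_false, hdne, if_true]
            exact (ih rest hrest).2 d (s + 1) hd
          | false =>
            simp only [aLoop, runCount, hdig, hsep, Bool.false_and, Bool.false_eq_true, if_false]
            cases h : decide (10 ≤ d) && decide (1 ≤ s)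
            · simp only [Bool.false_eq_true, if_false]
              have hb : bScan (c :: rest) = bScan rest := by
                simp [bScan, hdig]
              rw [hb]
              exact (ih rest hrest).1
            · simp

-- ===== VERDICT (by name: the statement is the Claim_ definition above) =====
theorem looks_like_spaced_phone_py_spec : Claim_equal_looks_like_spaced_phone_py := by
  intro content _
  unfold Spec_looks_like_spaced_phone_py looks_like_spaced_phone_py looks_like_spaced_phone_py_alt
  exact (key content.toList.length content.toList (le_refl _)).1
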